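-- pv_equiv track=rewrite | github.com/Salome2010/IntroProgramacion | Guias/simPython.py | acomodar
-- ===== SOURCE A (Python) =====
-- def acomodar(s:[str])->[str]:
--     res=[]
--     for boleta in s:
--         if boleta=="UP":
--             res.append(boleta)
--     for boleta in s:
--         if boleta=="LLA":
--             res.append(boleta)
--     return res
-- ===== SOURCE B (Python) =====
-- def acomodar(s):
--     # one pass: keep UP-block before LLA-block via positional insert at split index k
--     res = []
--     k = 0  # current number of "UP" entries (they occupy res[:k])
--     for boleta in s:
--         if boleta == "UP":
--             res.insert(k, boleta)
--             k += 1
--         elif boleta == "LLA":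
--             res.append(boleta)
--     return res
-- ===== Notes on version B (the rewrite author's own statement) =====
-- stated objective: alternative
-- what changed: single pass over the input maintaining a split index: each 'UP' is inserted at the split position and each 'LLA' appended, instead of A's two separate filtering passes
import Mathlib
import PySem

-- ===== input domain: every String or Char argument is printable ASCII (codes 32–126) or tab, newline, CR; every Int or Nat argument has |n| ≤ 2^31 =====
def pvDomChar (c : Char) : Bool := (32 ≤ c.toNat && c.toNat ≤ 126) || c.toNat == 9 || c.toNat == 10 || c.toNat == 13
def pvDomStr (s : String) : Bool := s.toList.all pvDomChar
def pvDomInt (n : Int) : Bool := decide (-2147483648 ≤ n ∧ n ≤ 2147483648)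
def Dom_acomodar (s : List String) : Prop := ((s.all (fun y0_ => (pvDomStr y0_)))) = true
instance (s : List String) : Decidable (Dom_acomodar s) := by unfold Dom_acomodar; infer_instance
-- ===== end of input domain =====

-- B replaces A's two filtering passes by one pass that inserts each 'UP' at a maintained split
-- index and appends each 'LLA' (alternative decomposition, same result).

-- ===== PORT A =====
def acomodar (s : List String) : List String :=
  let res := s.foldl (fun r boleta => if boleta == "UP" then r ++ [boleta] else r) []
  s.foldl (fun r boleta => if boleta == "LLA" then r ++ [boleta] else r) res

-- ===== PORT B =====
def acomodar_alt (s : List String) : List String :=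
  (s.foldl (fun (st : List String × Nat) boleta =>
      if boleta == "UP" then (PySem.List.insert st.1 (st.2 : Int) boleta, st.2 + 1)
      else if boleta == "LLA" then (st.1 ++ [boleta], st.2)
      else st) ([], 0)).1

-- ===== PRECONDITION & SPEC =====
def Spec_acomodar (s : List String) (out : List String) : Prop := out = acomodar_alt s
instance (s : List String) (out : List String) : Decidable (Spec_acomodar s out) := by unfold Spec_acomodar; infer_instance

-- ===== CLAIM (what is proved, stated in full; the proofs are below) =====
def Claim_equal_acomodar : Prop := ∀ (s : List String), Dom_acomodar s → Spec_acomodar s (acomodar s)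

-- ===== LEMMAS AND PROOFS =====
theorem filter_loop_eq_replicate (v : String) (s : List String) (r : List String) :
    s.foldl (fun r b => if b = v then r ++ [b] else r) r
      = r ++ List.replicate (s.count v) v := by
  induction s generalizing r with
  | nil => simp
  | cons x xs ih =>
    by_cases h : x = v
    · subst h
      simp [List.foldl_cons, ih, List.count_cons, List.replicate_succ]
    · simp [List.foldl_cons, ih, List.count_cons, h]

theorem alt_loop_invariant (s : List String) (a c : Nat) :
    s.foldl (fun (st : List String × Nat) boleta =>
        if boleta == "UP" then (PySem.List.insert st.1 (st.2 : Int) boleta, st.2 + 1)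
        else if boleta == "LLA" then (st.1 ++ [boleta], st.2)
        else st) (List.replicate a "UP" ++ List.replicate c "LLA", a)
      = (List.replicate (a + s.count "UP") "UP" ++ List.replicate (c + s.count "LLA") "LLA",
         a + s.count "UP") := by
  induction s generalizing a c with
  | nil => simp
  | cons x xs ih =>
    rw [List.foldl_cons]
    by_cases h : x = "UP"
    · subst h
      have hins : PySem.List.insert (List.replicate a "UP" ++ List.replicate c "LLA")
          ((a : Nat) : Int) "UP"
          = List.replicate (a + 1) "UP" ++ List.replicate c "LLA" := by
        rw [PySem.List.insert_natCast _ _ _ (by simp)]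
        simp [List.take_append_of_le_length, List.drop_append_of_le_length,
          List.replicate_succ' (n := a)]
      rw [if_pos (show (("UP":String) == "UP") = true from rfl)]
      dsimp only
      rw [hins, ih (a + 1) c]
      simp [List.count_cons, Nat.add_comm, Nat.add_left_comm, Nat.add_assoc]
    · by_cases h2 : x = "LLA"
      · subst h2
        rw [if_neg (show ¬ ((("LLA":String) == "UP") = true) by decide),
          if_pos (show (("LLA":String) == "LLA") = true from rfl)]
        dsimp only
        have happ : (List.replicate a "UP" ++ List.replicate c "LLA") ++ ["LLA"]
            = List.replicate a "UP" ++ List.replicate (c + 1) "LLA" := by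
          simp [List.replicate_succ' (n := c)]
        rw [happ, ih a (c + 1)]
        simp [List.count_cons, Nat.add_comm, Nat.add_left_comm, Nat.add_assoc]
      · rw [if_neg (by simp [h]), if_neg (by simp [h2]), ih a c]
        simp [List.count_cons, h, h2]

-- ===== VERDICT (by name: the statement is the Claim_ definition above) =====
theorem acomodar_spec : Claim_equal_acomodar := by
  intro s _
  unfold Spec_acomodar acomodar acomodar_alt
  have h := alt_loop_invariant s 0 0
  simp only [List.replicate_zero, List.nil_append, Nat.zero_add] at h
  rw [h]
  simp only [beq_iff_eq]
  rw [filter_loop_eq_replicate, filter_loop_eq_replicate]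
  simp
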